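-- pv_equiv track=rewrite | github.com/VytenisGaule/sums-of-unique-pairs | src/utils.py | get_unique_pairs
-- ===== SOURCE A (Python) =====
-- def remove_non_duplicates(dic: dict) -> dict:
--     """Remove non-duplicate values and return a new dict sorted by key."""
--     if not isinstance(dic, dict):
--         raise TypeError("Input must be a dictionary")
--     filtered = {k: v for k, v in dic.items() if len(v) >= 2}
--     return dict(sorted(filtered.items()))
--
-- def get_unique_pairs(li: list) -> dict:
--     """return possible pairs"""
--
--     sum_pairs: dict = {}
--     n: int = len(li)
--
--     for i in range(n):
--         for j in range(i + 1, n):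
--             pair_sum: int = li[i] + li[j]
--             if pair_sum not in sum_pairs:
--                 sum_pairs[pair_sum] = []
--             sum_pairs[pair_sum].append((li[i], li[j]))
--
--     # Remove pairs with only one occurrence and sort ascending
--     sum_pairs: dict = remove_non_duplicates(sum_pairs)
--     return sum_pairs
-- ===== SOURCE B (Python) =====
-- def get_unique_pairs(li: list) -> dict:
--     """return possible pairs"""
--     n = len(li)
--     # pass 1: count how many pairs produce each sum
--     counts: dict = {}
--     for i in range(n):
--         for j in range(i + 1, n):
--             s = li[i] + li[j]
--             counts[s] = counts.get(s, 0) + 1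
--     # pass 2: collect only the pairs whose sum occurs at least twice
--     result: dict = {}
--     for i in range(n):
--         for j in range(i + 1, n):
--             s = li[i] + li[j]
--             if counts.get(s, 0) >= 2:
--                 if s not in result:
--                     result[s] = []
--                 result[s].append((li[i], li[j]))
--     return dict(sorted(result.items()))
-- ===== Notes on version B (the rewrite author's own statement) =====
-- stated objective: alternative
-- what changed: Replaces A's build-everything-then-filter pipeline (group every pair into a dict, then a helper that filters out sums with fewer than two pairs) with a count-first-then-collect decomposition: a first pass counts pair sums, a second pass collects only pairs whose sum occurs at least twice, so no list is ever materialized for a non-surviving sum and no filtering helper is needed.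
import Mathlib
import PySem

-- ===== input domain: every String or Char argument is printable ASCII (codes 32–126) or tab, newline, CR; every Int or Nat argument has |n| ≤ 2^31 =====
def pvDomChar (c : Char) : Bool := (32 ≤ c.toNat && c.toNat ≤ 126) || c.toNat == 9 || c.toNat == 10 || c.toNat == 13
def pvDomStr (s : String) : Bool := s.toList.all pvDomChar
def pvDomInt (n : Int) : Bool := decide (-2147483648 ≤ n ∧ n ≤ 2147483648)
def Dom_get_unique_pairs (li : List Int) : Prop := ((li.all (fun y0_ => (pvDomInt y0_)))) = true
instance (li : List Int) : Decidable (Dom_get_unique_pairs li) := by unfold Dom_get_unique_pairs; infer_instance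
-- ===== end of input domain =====

-- B replaces A's group-every-pair-then-filter pipeline with a count-first-then-collect
-- two-pass decomposition (alternative decomposition, same asymptotic cost).


-- ===== PORT A =====
-- Python sorted(dict.items()) compares (key, value) tuples; dict keys are unique, so the
-- comparison never reaches the value: sorting by the key alone is exact here.
def remove_non_duplicates (dic : PySem.Dict Int (List (Int × Int))) : List (Int × List (Int × Int)) :=
  let filtered := dic.items.filter (fun kv => decide (2 ≤ kv.2.length))
  PySem.List.sorted filtered (fun kv => kv.1) false

def get_unique_pairs (li : List Int) : List (Int × List (Int × Int)) :=
  let n : Int := li.length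
  let sum_pairs : PySem.Dict Int (List (Int × Int)) :=
    (PySem.List.pyRange 0 n 1).foldl (fun d i =>
      (PySem.List.pyRange (i + 1) n 1).foldl (fun d j =>
        let pair_sum : Int := PySem.List.pyGetD li i 0 + PySem.List.pyGetD li j 0
        let d := if d.contains pair_sum then d else d.insert pair_sum []
        d.modify pair_sum [] (fun v => v ++ [(PySem.List.pyGetD li i 0, PySem.List.pyGetD li j 0)])) d)
      PySem.Dict.empty
  remove_non_duplicates sum_pairs

-- ===== PORT B =====
def get_unique_pairs_alt (li : List Int) : List (Int × List (Int × Int)) :=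
  let n : Int := li.length
  let counts : PySem.Dict Int Int :=
    (PySem.List.pyRange 0 n 1).foldl (fun c i =>
      (PySem.List.pyRange (i + 1) n 1).foldl (fun c j =>
        let s : Int := PySem.List.pyGetD li i 0 + PySem.List.pyGetD li j 0
        c.insert s (c.getD s 0 + 1)) c)
      PySem.Dict.empty
  let result : PySem.Dict Int (List (Int × Int)) :=
    (PySem.List.pyRange 0 n 1).foldl (fun d i =>
      (PySem.List.pyRange (i + 1) n 1).foldl (fun d j =>
        let s : Int := PySem.List.pyGetD li i 0 + PySem.List.pyGetD li j 0
        if 2 ≤ counts.getD s 0 then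
          let d := if d.contains s then d else d.insert s []
          d.modify s [] (fun v => v ++ [(PySem.List.pyGetD li i 0, PySem.List.pyGetD li j 0)])
        else d) d)
      PySem.Dict.empty
  PySem.List.sorted result.items (fun kv => kv.1) false

-- ===== PRECONDITION & SPEC =====
def Spec_get_unique_pairs (li : List Int) (out : List (Int × List (Int × Int))) : Prop := out = get_unique_pairs_alt li
instance (li : List Int) (out : List (Int × List (Int × Int))) : Decidable (Spec_get_unique_pairs li out) := by unfold Spec_get_unique_pairs; infer_instance

-- ===== CLAIM (what is proved, stated in full; the proofs are below) =====
def Claim_equal_get_unique_pairs : Prop := ∀ (li : List Int), Dom_get_unique_pairs li → Spec_get_unique_pairs li (get_unique_pairs li)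

-- ===== LEMMAS AND PROOFS =====

-- the (sum, pair) stream both loops traverse
def pvPairs (li : List Int) : List (Int × (Int × Int)) :=
  (PySem.List.pyRange 0 (li.length : Int) 1).flatMap (fun i =>
    (PySem.List.pyRange (i + 1) (li.length : Int) 1).map (fun j =>
      (PySem.List.pyGetD li i 0 + PySem.List.pyGetD li j 0,
       (PySem.List.pyGetD li i 0, PySem.List.pyGetD li j 0))))

-- a nested index loop is a fold over the flattened (sum, pair) stream
theorem pvNested_eq_foldl_pairs {α : Type} (li : List Int) (F : α → Int × (Int × Int) → α) (init : α) :
    (PySem.List.pyRange 0 (li.length : Int) 1).foldl (fun a i =>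
      (PySem.List.pyRange (i + 1) (li.length : Int) 1).foldl (fun a j =>
        F a (PySem.List.pyGetD li i 0 + PySem.List.pyGetD li j 0,
             (PySem.List.pyGetD li i 0, PySem.List.pyGetD li j 0))) a) init
    = (pvPairs li).foldl F init := by
  rw [pvPairs, List.foldl_flatMap]
  apply PySem.List.foldl_congr_mem
  intro a i _
  rw [List.foldl_map]

theorem pvStepA_eq_modify (d : PySem.Dict Int (List (Int × Int))) (s : Int) (p : Int × Int) :
    (let d' := if d.contains s then d else d.insert s []
     d'.modify s [] (fun v => v ++ [p])) = d.modify s [] (fun v => v ++ [p]) := by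
  by_cases h : d.contains s
  · simp [h]
  · have h' : d.contains s = false := by simpa using h
    simp [h', PySem.Dict.modify, PySem.Dict.getD_insert_self, PySem.Dict.insert_insert_self,
      PySem.Dict.getD_of_not_contains]

-- Set.ofList commutes with filter
theorem pvOfList_filter (p : Int → Bool) (xs : List Int) :
    PySem.Set.ofList (xs.filter p) = (PySem.Set.ofList xs).filter p := by
  induction xs using List.reverseRecOn with
  | nil => rfl
  | append_singleton xs x ih =>
    rw [List.filter_append, PySem.Set.ofList_append_singleton]
    by_cases hp : p x
    · simp only [List.filter_cons, hp, if_true, List.filter_nil,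
        PySem.Set.ofList_append_singleton, ih, PySem.Set.add_eq_ite]
      by_cases hm : x ∈ PySem.Set.ofList xs
      · simp [hm, List.mem_filter.mpr ⟨hm, hp⟩]
      · have : x ∉ (PySem.Set.ofList xs).filter p := fun h => hm (List.mem_filter.mp h).1
        simp [hm, hp, this, List.filter_append]
    · simp only [List.filter_cons, hp, Bool.false_eq_true, if_false, List.filter_nil,
        List.append_nil, ih, PySem.Set.add_eq_ite]
      by_cases hm : x ∈ PySem.Set.ofList xs
      · simp [hm]
      · simp [hm, List.filter_append, hp]


-- the grouping fold both ports reduce to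
def pvG (ps : List (Int × (Int × Int))) : PySem.Dict Int (List (Int × Int)) :=
  ps.foldl (fun d q => d.modify q.1 [] (fun v => v ++ [q.2])) PySem.Dict.empty

theorem pvG_getD (ps : List (Int × (Int × Int))) (c : Int) :
    (pvG ps).getD c [] = (ps.filter (fun q => q.1 == c)).map (fun q => q.2) := by
  rw [pvG, PySem.Dict.getD_foldl_modify_append, PySem.Dict.getD_empty, List.nil_append]

theorem pvG_keys (ps : List (Int × (Int × Int))) :
    (pvG ps).keys = PySem.Set.ofList (ps.map (fun q => q.1)) := by
  rw [pvG, PySem.Dict.keys_foldl_modify_key, PySem.Dict.keys_empty, PySem.Set.update_nil_left]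

theorem pvG_nodup (ps : List (Int × (Int × Int))) : (pvG ps).keys.Nodup := by
  rw [pvG_keys]; exact PySem.Set.nodup_ofList _

theorem pvCount (ps : List (Int × (Int × Int))) (c : Int) :
    (ps.filter (fun q => q.1 == c)).length = (ps.map (fun q => q.1)).count c := by
  rw [List.count, List.countP_map]
  exact List.countP_eq_length_filter.symm

-- core: filtering the all-pairs group dict by value length = grouping only pairs of surviving sums
theorem pvCore (ps : List (Int × (Int × Int))) :
    (pvG ps).items.filter (fun kv => decide (2 ≤ kv.2.length))
      = (pvG (ps.filter (fun q => decide (2 ≤ (ps.map (fun q => q.1)).count q.1)))).items := by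
  set sums := ps.map (fun q => q.1) with hsums
  set P : Int → Bool := fun s => decide (2 ≤ sums.count s) with hP
  set ps' := ps.filter (fun q => P q.1) with hps'
  have hlhs : (pvG ps).items = (PySem.Set.ofList sums).map (fun k => (k, (pvG ps).getD k [])) := by
    rw [PySem.Dict.items_eq_map_keys _ (pvG_nodup ps) [], pvG_keys]
  have hmap : ps'.map (fun q => q.1) = sums.filter P := by
    rw [hps', hsums, List.filter_map]
    rfl
  have hrhs : (pvG ps').items
      = ((PySem.Set.ofList sums).filter P).map (fun k => (k, (pvG ps').getD k [])) := by
    rw [PySem.Dict.items_eq_map_keys _ (pvG_nodup ps') [], pvG_keys, hmap, pvOfList_filter]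
  rw [hlhs, hrhs, List.filter_map]
  have hpred : ((fun kv : Int × List (Int × Int) => decide (2 ≤ kv.2.length)) ∘
      (fun k => (k, (pvG ps).getD k []))) = P := by
    funext k
    simp only [Function.comp, pvG_getD, List.length_map, pvCount, hP]
    rw [← hsums]
  rw [hpred]
  refine List.map_congr_left (fun k hk => ?_)
  have hPk : P k = true := (List.mem_filter.mp hk).2
  have hfe : ps'.filter (fun q => q.1 == k) = ps.filter (fun q => q.1 == k) := by
    rw [hps', List.filter_filter]
    refine List.filter_congr (fun q _ => ?_)
    by_cases h : q.1 = k
    · simp [h, hPk]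
    · simp [h]
  rw [Prod.mk.injEq]
  exact ⟨rfl, by rw [pvG_getD, pvG_getD, hfe]⟩

-- B's second pass, as a function of the counts dict (for congruence reasoning)
def pvBResult (li : List Int) (counts : PySem.Dict Int Int) : PySem.Dict Int (List (Int × Int)) :=
  (PySem.List.pyRange 0 (li.length : Int) 1).foldl (fun d i =>
    (PySem.List.pyRange (i + 1) (li.length : Int) 1).foldl (fun d j =>
      let s : Int := PySem.List.pyGetD li i 0 + PySem.List.pyGetD li j 0
      if 2 ≤ counts.getD s 0 then
        let d := if d.contains s then d else d.insert s []
        d.modify s [] (fun v => v ++ [(PySem.List.pyGetD li i 0, PySem.List.pyGetD li j 0)])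
      else d) d)
    PySem.Dict.empty

-- the two loop-step functions, named for the bridging lemmas
theorem pvA_form (li : List Int) :
    get_unique_pairs li
      = PySem.List.sorted ((pvG (pvPairs li)).items.filter (fun kv => decide (2 ≤ kv.2.length)))
          (fun kv => kv.1) false := by
  have h1 : (PySem.List.pyRange 0 (li.length : Int) 1).foldl (fun d i =>
      (PySem.List.pyRange (i + 1) (li.length : Int) 1).foldl (fun d j =>
        let pair_sum : Int := PySem.List.pyGetD li i 0 + PySem.List.pyGetD li j 0
        let d := if d.contains pair_sum then d else d.insert pair_sum []
        d.modify pair_sum [] (fun v => v ++ [(PySem.List.pyGetD li i 0, PySem.List.pyGetD li j 0)])) d)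
      PySem.Dict.empty = pvG (pvPairs li) := by
    have h2 := pvNested_eq_foldl_pairs li (fun d (q : Int × (Int × Int)) =>
      let d' := if d.contains q.1 then d else d.insert q.1 []
      d'.modify q.1 [] (fun v => v ++ [q.2])) PySem.Dict.empty
    refine h2.trans ?_
    rw [pvG]
    apply PySem.List.foldl_congr_mem
    intro d q _
    exact pvStepA_eq_modify d q.1 q.2
  exact congrArg (fun d : PySem.Dict Int (List (Int × Int)) =>
    PySem.List.sorted (d.items.filter (fun kv => decide (2 ≤ kv.2.length))) (fun kv => kv.1) false) h1

theorem pvB_form (li : List Int) :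
    get_unique_pairs_alt li
      = PySem.List.sorted ((pvG ((pvPairs li).filter (fun q =>
          decide (2 ≤ ((pvPairs li).map (fun q => q.1)).count q.1)))).items)
          (fun kv => kv.1) false := by
  set sums := (pvPairs li).map (fun q : Int × (Int × Int) => q.1) with hsums
  have hc : (PySem.List.pyRange 0 (li.length : Int) 1).foldl (fun c i =>
      (PySem.List.pyRange (i + 1) (li.length : Int) 1).foldl (fun c j =>
        let s : Int := PySem.List.pyGetD li i 0 + PySem.List.pyGetD li j 0
        c.insert s (c.getD s 0 + 1)) c) (PySem.Dict.empty : PySem.Dict Int Int)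
      = (pvPairs li).foldl (fun c (q : Int × (Int × Int)) => c.insert q.1 (c.getD q.1 0 + 1))
          PySem.Dict.empty :=
    pvNested_eq_foldl_pairs li (fun (c : PySem.Dict Int Int) (q : Int × (Int × Int)) =>
      c.insert q.1 (c.getD q.1 0 + 1)) PySem.Dict.empty
  have hcount : ∀ s : Int, ((pvPairs li).foldl
      (fun (c : PySem.Dict Int Int) (q : Int × (Int × Int)) => c.insert q.1 (c.getD q.1 0 + 1))
      PySem.Dict.empty).getD s 0 = sums.count s := by
    intro s
    have hm : (pvPairs li).foldl
        (fun (c : PySem.Dict Int Int) (q : Int × (Int × Int)) => c.insert q.1 (c.getD q.1 0 + 1))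
        PySem.Dict.empty
        = sums.foldl (fun c x => c.insert x (c.getD x 0 + 1)) PySem.Dict.empty := by
      rw [hsums, List.foldl_map]
    rw [hm, PySem.Dict.getD_foldl_insert_add_one, PySem.Dict.getD_empty, zero_add]
  set counts := (pvPairs li).foldl
      (fun (c : PySem.Dict Int Int) (q : Int × (Int × Int)) => c.insert q.1 (c.getD q.1 0 + 1))
      PySem.Dict.empty with hcdef
  have hr : pvBResult li counts
      = pvG ((pvPairs li).filter (fun q => decide (2 ≤ sums.count q.1))) := by
    rw [pvBResult]
    have h2 := pvNested_eq_foldl_pairs li (fun d (q : Int × (Int × Int)) =>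
      if 2 ≤ counts.getD q.1 0 then
        let d' := if d.contains q.1 then d else d.insert q.1 []
        d'.modify q.1 [] (fun v => v ++ [q.2])
      else d) PySem.Dict.empty
    refine h2.trans ?_
    have h3 : (pvPairs li).foldl (fun d (q : Int × (Int × Int)) =>
        if 2 ≤ counts.getD q.1 0 then
          let d' := if d.contains q.1 then d else d.insert q.1 []
          d'.modify q.1 [] (fun v => v ++ [q.2])
        else d) PySem.Dict.empty
        = (pvPairs li).foldl (fun d (q : Int × (Int × Int)) =>
            if 2 ≤ counts.getD q.1 0 then d.modify q.1 [] (fun v => v ++ [q.2]) else d)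
            PySem.Dict.empty := by
      apply PySem.List.foldl_congr_mem
      intro d q _
      by_cases h : 2 ≤ counts.getD q.1 0
      · simp only [h, if_true]
        exact pvStepA_eq_modify d q.1 q.2
      · simp [h]
    rw [h3, PySem.List.foldl_ite_eq_foldl_filter, pvG]
    congr 1
    refine List.filter_congr (fun q _ => ?_)
    refine decide_eq_decide.mpr ?_
    rw [hcount q.1]
    omega
  rw [hcdef] at hc
  have hfinal : pvBResult li ((PySem.List.pyRange 0 (li.length : Int) 1).foldl (fun c i =>
      (PySem.List.pyRange (i + 1) (li.length : Int) 1).foldl (fun c j =>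
        let s : Int := PySem.List.pyGetD li i 0 + PySem.List.pyGetD li j 0
        c.insert s (c.getD s 0 + 1)) c) PySem.Dict.empty)
      = pvG ((pvPairs li).filter (fun q =>
          decide (2 ≤ ((pvPairs li).map (fun q => q.1)).count q.1))) := by
    rw [hc, ← hcdef, hr, ← hsums]
  exact congrArg (fun d : PySem.Dict Int (List (Int × Int)) =>
    PySem.List.sorted d.items (fun kv => kv.1) false) hfinal

-- ===== VERDICT (by name: the statement is the Claim_ definition above) =====
theorem get_unique_pairs_spec : Claim_equal_get_unique_pairs := by
  intro li _
  show get_unique_pairs li = get_unique_pairs_alt li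
  rw [pvA_form, pvB_form, pvCore]
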